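-- pv_equiv track=rewrite | github.com/jk-jung/problem-solving | codewars/6kyu/6_A Rule of Divisibility by 13.py | thirt
-- ===== SOURCE A (Python) =====
-- def thirt(n, m = -1):
--     if n == m: return n
--     r, x, j = 0, str(n), 0
--     for i in range(len(x) - 1, -1, -1):
--         t = int(x[i])
--         r += [1, 10, 9, 12, 3, 4][j % 6]  * t
--         j += 1
--     return thirt(r, n)
-- ===== SOURCE B (Python) =====
-- def thirt(n, m=-1):
--     W = [1, 10, 9, 12, 3, 4]
--     while n != m:
--         m = n
--         r, j, q = 0, 0, n
--         while True:
--             q, d = divmod(q, 10)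
--             r += W[j % 6] * d
--             j += 1
--             if q == 0:
--                 break
--         n = r
--     return n
-- ===== Notes on version B (the rewrite author's own statement) =====
-- stated objective: alternative
-- what changed: Replaces A's self-recursion plus per-digit string conversion (str(n), int(x[i])) by an iterative while loop that extracts digits arithmetically with divmod, so no string is ever built or parsed.
import Mathlib
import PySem

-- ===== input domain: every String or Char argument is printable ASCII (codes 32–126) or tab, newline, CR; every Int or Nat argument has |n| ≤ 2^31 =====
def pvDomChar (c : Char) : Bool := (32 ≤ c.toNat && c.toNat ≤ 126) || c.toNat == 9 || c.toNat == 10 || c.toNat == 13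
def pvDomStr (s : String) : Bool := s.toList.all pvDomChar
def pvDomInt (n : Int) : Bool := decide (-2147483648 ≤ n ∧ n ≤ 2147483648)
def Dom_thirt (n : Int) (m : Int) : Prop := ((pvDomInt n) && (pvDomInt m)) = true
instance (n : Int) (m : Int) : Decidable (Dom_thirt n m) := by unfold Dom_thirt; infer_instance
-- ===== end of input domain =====

-- B replaces A's recursion + per-digit string parsing by an iterative loop extracting digits with divmod (alternative decomposition, no str() built or parsed).


-- ===== PORT A =====
-- one recursive call of A: r = sum of weight[j%6] * int(str(n)[i]) over i = len-1 .. 0.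
-- int(x[i]) raises ValueError on the '-' of a negative n: the '.getD 0' totalizes exactly there,
-- which Pre_thirt excludes.
def thirtWeighted (n : Int) : Int :=
  let x := PySem.Int.toChars n
  ((PySem.List.pyRange ((x.length : Int) - 1) (-1) (-1)).foldl
    (fun (rj : Int × Int) (i : Int) =>
      (rj.1 + PySem.List.pyGetD ([1, 10, 9, 12, 3, 4] : List Int) (PySem.Int.mod rj.2 6) 0
          * (PySem.Int.ofChars? [PySem.List.pyGetD x i ' ']).getD 0,
       rj.2 + 1))
    (0, 0)).1

-- A's self-recursion 'return thirt(r, n)' as structural recursion on a fuel counter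
-- (a totalization guard only: on admitted inputs the Python recursion depth is tiny; at fuel 0 return n)
def thirtGo : Nat → Int → Int → Int
  | 0, n, _ => n
  | fuel + 1, n, m => if n = m then n else thirtGo fuel (thirtWeighted n) n

def thirt (n : Int) (m : Int) : Int := thirtGo 64 n m

-- ===== PORT B =====
-- B's inner do-while: q, d = divmod(q, 10); r += W[j%6]*d; break when q == 0.
-- The stop test 'q' ≤ 0' is Python's 'q == 0' on every admitted input (q ≥ 0 throughout);
-- for negative q Python's loop never terminates, so stopping there is a totalization guard only.
def thirtDigits (q : Int) (j : Int) (r : Int) : Int :=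
  let q' := PySem.Int.floordiv q 10
  let d := PySem.Int.mod q 10
  let r' := r + PySem.List.pyGetD ([1, 10, 9, 12, 3, 4] : List Int) (PySem.Int.mod j 6) 0 * d
  if h : q' ≤ 0 then r' else thirtDigits q' (j + 1) r'
termination_by q.toNat
decreasing_by
  have h1 : (1 : Int) * 10 ≤ q := (PySem.Int.le_floordiv_iff_mul_le (by omega)).mp (by omega)
  have h2 : (PySem.Int.floordiv q 10) * 10 ≤ q :=
    (PySem.Int.le_floordiv_iff_mul_le (by omega)).mp le_rfl
  omega

-- B's outer while loop, as the same fuel recursion shape (totalization guard only; at fuel 0 return n)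
def thirtLoop : Nat → Int → Int → Int
  | 0, n, _ => n
  | fuel + 1, n, m => if n = m then n else thirtLoop fuel (thirtDigits n 0 0) n

def thirt_alt (n : Int) (m : Int) : Int := thirtLoop 64 n m

-- ===== PRECONDITION & SPEC =====
-- Pre_ excludes n < 0 with n ≠ m: there str(n) starts with '-' and A raises ValueError on int('-').
def Pre_thirt (n : Int) (m : Int) : Prop := 0 ≤ n ∨ n = m
instance (n : Int) (m : Int) : Decidable (Pre_thirt n m) := by unfold Pre_thirt; infer_instance
def pvWitness_thirt : Int × Int := (1234, -1)

def Spec_thirt (n : Int) (m : Int) (out : Int) : Prop := out = thirt_alt n m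
instance (n : Int) (m : Int) (out : Int) : Decidable (Spec_thirt n m out) := by unfold Spec_thirt; infer_instance

-- ===== CLAIM (what is proved, stated in full; the proofs are below) =====
def Claim_equal_thirt : Prop := ∀ (n : Int) (m : Int), Dom_thirt n m → Pre_thirt n m → Spec_thirt n m (thirt n m)

-- ===== LEMMAS AND PROOFS =====

-- common spec of one weighted-digit-sum pass, by recursion on the number q (digits least-significant first)
def pvW (q : Nat) (j : Nat) : Int :=
  ([1, 10, 9, 12, 3, 4] : List Int).getD (j % 6) 0 * (q % 10 : Nat)
    + (if h : q < 10 then 0 else pvW (q / 10) (j + 1))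
termination_by q
decreasing_by exact Nat.div_lt_self (by omega) (by omega)

lemma pvWt_spec (j : Int) (hj : 0 ≤ j) :
    PySem.List.pyGetD ([1, 10, 9, 12, 3, 4] : List Int) (PySem.Int.mod j 6) 0
      = ([1, 10, 9, 12, 3, 4] : List Int).getD (j.toNat % 6) 0 := by
  obtain ⟨k, rfl⟩ := Int.eq_ofNat_of_zero_le hj
  have h : PySem.Int.mod (k : Int) 6 = ((k % 6 : Nat) : Int) := by
    exact_mod_cast PySem.Int.mod_natCast k 6
  rw [h, PySem.List.pyGetD_natCast]
  simp

lemma pvWt_pos (t : Nat) : (1 : Int) ≤ ([1, 10, 9, 12, 3, 4] : List Int).getD (t % 6) 0 := by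
  have h : t % 6 = 0 ∨ t % 6 = 1 ∨ t % 6 = 2 ∨ t % 6 = 3 ∨ t % 6 = 4 ∨ t % 6 = 5 := by omega
  rcases h with h | h | h | h | h | h <;> rw [h] <;> decide

lemma pvW_nonneg : ∀ q j : Nat, 0 ≤ pvW q j := by
  intro q
  induction q using Nat.strong_induction_on with
  | _ q ih =>
    intro j
    rw [pvW]
    have hw := pvWt_pos j
    have hd : (0 : Int) ≤ ((q % 10 : Nat) : Int) := by positivity
    by_cases h : q < 10
    · rw [dif_pos h]; nlinarith [hw, hd]
    · rw [dif_neg h]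
      have := ih (q / 10) (Nat.div_lt_self (by omega) (by omega)) (j + 1)
      nlinarith

lemma thirtDigits_eq_pvW : ∀ (q : Nat) (j : Nat) (r : Int),
    thirtDigits (q : Int) (j : Int) r = r + pvW q j := by
  intro q
  induction q using Nat.strong_induction_on with
  | _ q ih =>
    intro j r
    rw [thirtDigits, pvW]
    have hq : PySem.Int.floordiv (q : Int) 10 = ((q / 10 : Nat) : Int) := by
      exact_mod_cast PySem.Int.floordiv_natCast q 10
    have hd : PySem.Int.mod (q : Int) 10 = ((q % 10 : Nat) : Int) := by
      exact_mod_cast PySem.Int.mod_natCast q 10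
    have hw := pvWt_spec (j : Int) (Int.natCast_nonneg j)
    simp only [hq, hd, hw, Int.toNat_natCast]
    by_cases h : q < 10
    · have h0 : q / 10 = 0 := Nat.div_eq_of_lt h
      rw [dif_pos (by simp [h0]), dif_pos h]
      ring
    · have h0 : ¬ ((q / 10 : Nat) : Int) ≤ 0 := by
        have : 1 ≤ q / 10 := Nat.one_le_div_iff (by omega) |>.mpr (by omega)
        omega
      rw [dif_neg h0, dif_neg h]
      have hj1 : ((j : Int) + 1) = ((j + 1 : Nat) : Int) := by push_cast; ring
      rw [hj1, ih (q / 10) (Nat.div_lt_self (by omega) (by omega)) (j + 1)]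
      ring

-- weighted fold over a char list (digits most-significant last already reversed away)
def pvWfold : List Char → Int → Int → Int
  | [], r, _ => r
  | c :: cs, r, j =>
      pvWfold cs
        (r + PySem.List.pyGetD ([1, 10, 9, 12, 3, 4] : List Int) (PySem.Int.mod j 6) 0
            * (PySem.Int.ofChars? [c]).getD 0)
        (j + 1)

-- A's descending-index loop over x equals the weighted fold over x.reverse
lemma foldA (x : List Char) : ∀ (r j : Int),
    ((PySem.List.pyRange ((x.length : Int) - 1) (-1) (-1)).foldl
      (fun (rj : Int × Int) (i : Int) =>
        (rj.1 + PySem.List.pyGetD ([1, 10, 9, 12, 3, 4] : List Int) (PySem.Int.mod rj.2 6) 0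
            * (PySem.Int.ofChars? [PySem.List.pyGetD x i ' ']).getD 0,
         rj.2 + 1))
      (r, j))
    = (pvWfold x.reverse r j, j + x.length) := by
  induction x using List.reverseRecOn with
  | nil =>
    intro r j
    rw [PySem.List.pyRange_neg_one_eq_nil (by norm_num)]
    simp [pvWfold]
  | append_singleton ys c ih =>
    intro r j
    have hlen : (((ys ++ [c]).length : Int) - 1) = (ys.length : Int) := by
      simp
    rw [hlen, PySem.List.pyRange_neg_one_cons (by omega)]
    simp only [List.foldl_cons]
    have hc : PySem.List.pyGetD (ys ++ [c]) ((ys.length : Int)) ' ' = c := by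
      rw [PySem.List.pyGetD_natCast]
      simp [List.getD]
    rw [hc]
    have hcongr :
        ((PySem.List.pyRange ((ys.length : Int) - 1) (-1) (-1)).foldl
          (fun (rj : Int × Int) (i : Int) =>
            (rj.1 + PySem.List.pyGetD ([1, 10, 9, 12, 3, 4] : List Int) (PySem.Int.mod rj.2 6) 0
                * (PySem.Int.ofChars? [PySem.List.pyGetD (ys ++ [c]) i ' ']).getD 0,
             rj.2 + 1))
          (r + PySem.List.pyGetD ([1, 10, 9, 12, 3, 4] : List Int) (PySem.Int.mod j 6) 0
              * (PySem.Int.ofChars? [c]).getD 0, j + 1))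
        = ((PySem.List.pyRange ((ys.length : Int) - 1) (-1) (-1)).foldl
          (fun (rj : Int × Int) (i : Int) =>
            (rj.1 + PySem.List.pyGetD ([1, 10, 9, 12, 3, 4] : List Int) (PySem.Int.mod rj.2 6) 0
                * (PySem.Int.ofChars? [PySem.List.pyGetD ys i ' ']).getD 0,
             rj.2 + 1))
          (r + PySem.List.pyGetD ([1, 10, 9, 12, 3, 4] : List Int) (PySem.Int.mod j 6) 0
              * (PySem.Int.ofChars? [c]).getD 0, j + 1)) := by
      apply PySem.List.foldl_congr_mem
      intro acc i hi
      have hm := (PySem.List.mem_pyRange_neg_one).mp hi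
      have h0 : 0 ≤ i := by omega
      have h1 : i < (ys.length : Int) := by omega
      have hg : PySem.List.pyGetD (ys ++ [c]) i ' ' = PySem.List.pyGetD ys i ' ' := by
        rw [PySem.List.pyGetD_eq_getElem (ys ++ [c]) ' ' h0 (by simp; omega),
            PySem.List.pyGetD_eq_getElem ys ' ' h0 h1]
        rw [List.getElem_append_left (by omega)]
      rw [hg]
    rw [hcongr, ih]
    simp only [List.reverse_append, List.reverse_singleton, List.singleton_append, pvWfold,
      List.length_append, List.length_cons, List.length_nil, Prod.mk.injEq]
    exact ⟨trivial, by push_cast; ring⟩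

lemma digitChar_val (d : Nat) (hd : d < 10) :
    (PySem.Int.ofChars? [Nat.digitChar d]).getD 0 = (d : Int) := by
  interval_cases d <;> decide

lemma pvWfold_toDigits : ∀ (k : Nat) (j : Nat) (r : Int),
    pvWfold (Nat.toDigits 10 k).reverse r (j : Int) = r + pvW k j := by
  intro k
  induction k using Nat.strong_induction_on with
  | _ k ih =>
    intro j r
    rw [Nat.toDigits_eq_if (by norm_num), pvW]
    have hw := pvWt_spec (j : Int) (Int.natCast_nonneg j)
    by_cases h : k < 10
    · rw [if_pos h, dif_pos h]
      simp only [List.reverse_singleton, pvWfold]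
      rw [digitChar_val k h, hw]
      simp [Nat.mod_eq_of_lt h]
    · rw [if_neg h, dif_neg h]
      simp only [List.reverse_append, List.reverse_singleton, List.singleton_append, pvWfold]
      rw [digitChar_val (k % 10) (Nat.mod_lt _ (by omega)), hw]
      have hj1 : ((j : Int) + 1) = ((j + 1 : Nat) : Int) := by push_cast; ring
      rw [hj1, ih (k / 10) (Nat.div_lt_self (by omega) (by omega)) (j + 1)]
      simp only [Int.toNat_natCast]
      ring

lemma step_eq (n : Int) (hn : 0 ≤ n) : thirtWeighted n = thirtDigits n 0 0 := by
  obtain ⟨k, rfl⟩ := Int.eq_ofNat_of_zero_le hn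
  have hx : PySem.Int.toChars (k : Int) = Nat.toDigits 10 k := by
    simp [PySem.Int.toChars, Int.toNat_natCast]
  have h1 := pvWfold_toDigits k 0 0
  norm_num at h1
  have h2 := thirtDigits_eq_pvW k 0 0
  norm_num at h2
  simp only [thirtWeighted, hx, foldA]
  rw [h1, h2]

lemma step_nonneg (n : Int) (hn : 0 ≤ n) : 0 ≤ thirtDigits n 0 0 := by
  obtain ⟨k, rfl⟩ := Int.eq_ofNat_of_zero_le hn
  have h : thirtDigits ((k : Int)) (((0 : Nat) : Int)) 0 = 0 + pvW k 0 := thirtDigits_eq_pvW k 0 0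
  norm_num at h
  rw [h]
  exact pvW_nonneg k 0

lemma go_eq : ∀ (fuel : Nat) (n m : Int), (0 ≤ n ∨ n = m) →
    thirtGo fuel n m = thirtLoop fuel n m := by
  intro fuel
  induction fuel with
  | zero => intro n m _; rfl
  | succ fuel ih =>
    intro n m hpre
    simp only [thirtGo, thirtLoop]
    by_cases h : n = m
    · simp [h]
    · rw [if_neg h, if_neg h]
      have hn : 0 ≤ n := hpre.resolve_right h
      rw [step_eq n hn]
      exact ih _ n (Or.inl (step_nonneg n hn))

-- ===== VERDICT (by name: the statement is the Claim_ definition above) =====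
theorem thirt_spec : Claim_equal_thirt := by
  intro n m _ hpre
  show thirt n m = thirt_alt n m
  exact go_eq 64 n m hpre
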